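-- pv_equiv track=rewrite | github.com/paulklemstine/factor | lean/books/TRIANGLESWALLOWEDUNIVERSE2/source/build_book.py | split_table_row
-- ===== SOURCE A (Python) =====
-- def split_table_row(line):
--     """Split a markdown table row on | but respect $...$ math mode."""
--     line = line.strip()
--     if line.startswith('|'):
--         line = line[1:]
--     if line.endswith('|'):
--         line = line[:-1]
--     cells = []
--     current = ""
--     in_math = False
--     for c in line:
--         if c == '$':
--             in_math = not in_math
--             current += c
--         elif c == '|' and not in_math:
--             cells.append(current.strip())
--             current = ""
--         else:
--             current += c
--     cells.append(current.strip())
--     return cells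
-- ===== SOURCE B (Python) =====
-- def split_table_row(line):
--     """Split a markdown table row on | but respect $...$ math mode."""
--     line = line.strip()
--     if line.startswith('|'):
--         line = line[1:]
--     if line.endswith('|'):
--         line = line[:-1]
--     cells = []
--     current = ""
--     in_math = False
--     first = True
--     for seg in line.split('$'):
--         if not first:
--             current += '$'
--         first = False
--         if in_math:
--             current += seg
--         else:
--             parts = seg.split('|')
--             current += parts[0]
--             for part in parts[1:]:
--                 cells.append(current.strip())
--                 current = part
--         in_math = not in_math
--     cells.append(current.strip())
--     return cells
-- ===== Notes on version B (the rewrite author's own statement) =====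
-- stated objective: alternative
-- what changed: Replaces A's per-character boolean state machine with a split on the math delimiter: segments are processed whole, odd-indexed (math-mode) segments appended verbatim and even-indexed ones split on the cell separator, reinserting the delimiter before every segment after the first.
import Mathlib
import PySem

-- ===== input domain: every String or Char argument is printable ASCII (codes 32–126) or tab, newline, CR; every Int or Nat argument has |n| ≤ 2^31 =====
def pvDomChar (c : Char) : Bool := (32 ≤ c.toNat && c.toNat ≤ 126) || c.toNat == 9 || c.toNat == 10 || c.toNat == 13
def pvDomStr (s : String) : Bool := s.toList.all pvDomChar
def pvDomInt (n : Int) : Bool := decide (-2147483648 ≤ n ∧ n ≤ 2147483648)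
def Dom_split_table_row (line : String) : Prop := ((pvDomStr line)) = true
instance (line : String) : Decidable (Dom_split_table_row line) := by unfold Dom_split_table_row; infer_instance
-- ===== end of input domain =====

-- B replaces A's per-character '$'-state machine by split-on-'$' segments processed
-- whole (odd segments appended verbatim, even ones split on '|'); objective: alternative decomposition.

-- ===== PORT A =====
-- A's for-loop over the characters, with A's state (cells, current, in_math).
def aLoop : List Char → List String → List Char → Bool → List String
  | [], cells, cur, _ => cells ++ [String.ofList (PySem.Chars.strip cur)]
  | c :: rest, cells, cur, m =>
    if c = '$' then aLoop rest cells (cur ++ [c]) (!m)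
    else if c = '|' ∧ m = false then aLoop rest (cells ++ [String.ofList (PySem.Chars.strip cur)]) [] m
    else aLoop rest cells (cur ++ [c]) m

def split_table_row (line : String) : List String :=
  let l0 := PySem.Chars.strip line.toList
  let l1 := if PySem.Chars.startswith l0 ['|'] then PySem.List.slice l0 (some 1) none else l0
  let l2 := if PySem.Chars.endswith l1 ['|'] then PySem.List.slice l1 none (some (-1)) else l1
  aLoop l2 [] [] false

-- ===== PORT B =====
-- hand port of Python str.split(sep) for a ONE-CHARACTER separator; exact there:
-- split cuts at every occurrence of sep and returns [''] on the empty string.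
def splitChar (sep : Char) : List Char → List (List Char)
  | [] => [[]]
  | c :: cs =>
    let r := splitChar sep cs
    if c = sep then [] :: r
    else match r with
      | [] => [[c]]            -- unreachable: splitChar never returns []
      | x :: xs => (c :: x) :: xs

-- B's inner loop: 'for part in parts[1:]' flushing the current cell.
def bParts : List (List Char) → List String → List Char → List String × List Char
  | [], cells, cur => (cells, cur)
  | p :: ps, cells, cur => bParts ps (cells ++ [String.ofList (PySem.Chars.strip cur)]) p

-- B's outer loop: 'for seg in line.split('$')' with state (cells, current, in_math, first).
def bSegs : List (List Char) → List String → List Char → Bool → Bool → List String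
  | [], cells, cur, _, _ => cells ++ [String.ofList (PySem.Chars.strip cur)]
  | seg :: rest, cells, cur, inMath, first =>
    let cur0 := if first then cur else cur ++ ['$']
    if inMath then
      bSegs rest cells (cur0 ++ seg) (!inMath) false
    else
      match splitChar '|' seg with
      | [] => bSegs rest cells cur0 (!inMath) false   -- unreachable
      | p :: ps =>
        let r := bParts ps cells (cur0 ++ p)
        bSegs rest r.1 r.2 (!inMath) false

def split_table_row_alt (line : String) : List String :=
  let l0 := PySem.Chars.strip line.toList
  let l1 := if PySem.Chars.startswith l0 ['|'] then PySem.List.slice l0 (some 1) none else l0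
  let l2 := if PySem.Chars.endswith l1 ['|'] then PySem.List.slice l1 none (some (-1)) else l1
  bSegs (splitChar '$' l2) [] [] false true

-- ===== PRECONDITION & SPEC =====
def Spec_split_table_row (line : String) (out : List String) : Prop := out = split_table_row_alt line
instance (line : String) (out : List String) : Decidable (Spec_split_table_row line out) := by unfold Spec_split_table_row; infer_instance

-- ===== CLAIM (what is proved, stated in full; the proofs are below) =====
def Claim_equal_split_table_row : Prop := ∀ (line : String), Dom_split_table_row line → Spec_split_table_row line (split_table_row line)

-- ===== LEMMAS AND PROOFS =====

theorem splitChar_ne_nil (sep : Char) (cs : List Char) : splitChar sep cs ≠ [] := by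
  cases cs with
  | nil => simp [splitChar]
  | cons c cs =>
    simp only [splitChar]
    split
    · simp
    · cases h : splitChar sep cs <;> simp

-- a '$' already in current is the same as a pending non-first segment
theorem bSegs_dollar (segs : List (List Char)) (cells : List String) (cur : List Char)
    (m : Bool) (h : segs ≠ []) :
    bSegs segs cells (cur ++ ['$']) m true = bSegs segs cells cur m false := by
  cases segs with
  | nil => exact absurd rfl h
  | cons s rest => simp [bSegs]

theorem aLoop_eq_bSegs (cs : List Char) :
    ∀ (cells : List String) (cur : List Char) (m : Bool),
    aLoop cs cells cur m = bSegs (splitChar '$' cs) cells cur m true := by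
  induction cs with
  | nil =>
    intro cells cur m
    cases m <;> simp [aLoop, splitChar, bSegs, bParts]
  | cons c cs ih =>
    intro cells cur m
    by_cases hd : c = '$'
    · subst hd
      have h1 : splitChar '$' ('$' :: cs) = [] :: splitChar '$' cs := by
        simp [splitChar]
      rw [h1]
      have h2 : bSegs ([] :: splitChar '$' cs) cells cur m true
          = bSegs (splitChar '$' cs) cells cur (!m) false := by
        cases m <;> simp [bSegs, splitChar, bParts]
      rw [h2, ← bSegs_dollar _ _ _ _ (splitChar_ne_nil '$' cs)]
      simpa [aLoop] using ih cells (cur ++ ['$']) (!m)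
    · obtain ⟨x, xs, hx⟩ : ∃ x xs, splitChar '$' cs = x :: xs := by
        cases h : splitChar '$' cs with
        | nil => exact absurd h (splitChar_ne_nil '$' cs)
        | cons x xs => exact ⟨x, xs, rfl⟩
      have h1 : splitChar '$' (c :: cs) = (c :: x) :: xs := by
        simp [splitChar, hd, hx]
      rw [h1]
      cases m with
      | true =>
        have := ih cells (cur ++ [c]) true
        rw [hx] at this
        have ha : aLoop (c :: cs) cells cur true = aLoop cs cells (cur ++ [c]) true := by
          simp [aLoop, hd]
        rw [ha, this]
        simp [bSegs]
      | false =>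
        obtain ⟨p, ps, hp⟩ : ∃ p ps, splitChar '|' x = p :: ps := by
          cases h : splitChar '|' x with
          | nil => exact absurd h (splitChar_ne_nil '|' x)
          | cons p ps => exact ⟨p, ps, rfl⟩
        by_cases hb : c = '|'
        · subst hb
          have := ih (cells ++ [String.ofList (PySem.Chars.strip cur)]) [] false
          rw [hx] at this
          have ha : aLoop ('|' :: cs) cells cur false
              = aLoop cs (cells ++ [String.ofList (PySem.Chars.strip cur)]) [] false := by
            simp [aLoop, hd]
          rw [ha, this]
          have hsp : splitChar '|' ('|' :: x) = [] :: splitChar '|' x := by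
            simp [splitChar]
          simp [bSegs, hsp, hp, bParts]
        · have := ih cells (cur ++ [c]) false
          rw [hx] at this
          have ha : aLoop (c :: cs) cells cur false = aLoop cs cells (cur ++ [c]) false := by
            simp [aLoop, hd, hb]
          rw [ha, this]
          have hsp : splitChar '|' (c :: x) = (c :: p) :: ps := by
            simp [splitChar, hb, hp]
          simp [bSegs, hsp, hp]

-- ===== VERDICT (by name: the statement is the Claim_ definition above) =====
theorem split_table_row_spec : Claim_equal_split_table_row := by
  intro line _
  show split_table_row line = split_table_row_alt line
  unfold split_table_row split_table_row_alt
  exact aLoop_eq_bSegs _ [] [] false
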